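-- pv_equiv track=rewrite | github.com/pypi-data/pypi-mirror-401 | packages/desto/desto-0.4.9.tar.gz/desto-0.4.9/src/desto/cli/utils.py | validate_session_name
-- ===== SOURCE A (Python) =====
-- def validate_session_name(name: str) -> bool:
--     """Validate a session name for tmux compatibility.
--
--     Args:
--         name: The session name to validate
--
--     Returns:
--         True if valid, False otherwise
--     """
--     if not name:
--         return False
--
--     # tmux session names cannot contain certain characters
--     invalid_chars = ['"', "'", "\\", "\n", "\r", "\t"]
--     for char in invalid_chars:
--         if char in name:
--             return False
--
--     return True
-- ===== SOURCE B (Python) =====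
-- def validate_session_name(name: str) -> bool:
--     """Validate a session name for tmux compatibility."""
--     if not name:
--         return False
--     bad = {'"', "'", "\\", "\n", "\r", "\t"}
--     return all(c not in bad for c in name)
-- ===== Notes on version B (the rewrite author's own statement) =====
-- stated objective: idiomatic
-- what changed: B inverts the traversal: instead of scanning the fixed blacklist and doing a substring search of the whole name per forbidden character, it makes one pass over the name's characters testing each against a forbidden-character set.
import Mathlib
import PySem

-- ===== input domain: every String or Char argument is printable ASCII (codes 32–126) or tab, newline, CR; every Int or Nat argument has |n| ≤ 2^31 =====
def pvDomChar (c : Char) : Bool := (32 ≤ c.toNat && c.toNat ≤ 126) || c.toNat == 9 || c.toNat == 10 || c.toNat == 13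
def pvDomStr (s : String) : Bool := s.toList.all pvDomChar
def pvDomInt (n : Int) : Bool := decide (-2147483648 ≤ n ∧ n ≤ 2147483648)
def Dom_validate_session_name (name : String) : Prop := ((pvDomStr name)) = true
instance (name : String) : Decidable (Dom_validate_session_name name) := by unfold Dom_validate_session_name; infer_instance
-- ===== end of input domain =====

-- B inverts the traversal: one pass over the name's characters against a forbidden-character set,
-- instead of A's scan over the blacklist with a substring search per entry. Objective: idiomatic.

-- ===== PORT A =====
-- for char in invalid_chars: if char in name: return False  →  any over the blacklist
def validate_session_name (name : String) : Bool :=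
  if name.toList = [] then false
  else
    let invalid_chars : List String := ["\"", "'", "\\", "\n", "\r", "\t"]
    if invalid_chars.any (fun ch => PySem.Str.isIn ch name) then false
    else true

-- ===== PORT B =====
def pvBadChars : List Char := ['"', '\'', '\\', '\n', '\r', '\t']

def validate_session_name_alt (name : String) : Bool :=
  if name.toList = [] then false
  else name.toList.all (fun c => !(pvBadChars.contains c))

-- ===== PRECONDITION & SPEC =====
def Spec_validate_session_name (name : String) (out : Bool) : Prop := out = validate_session_name_alt name
instance (name : String) (out : Bool) : Decidable (Spec_validate_session_name name out) := by unfold Spec_validate_session_name; infer_instance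

-- ===== CLAIM (what is proved, stated in full; the proofs are below) =====
def Claim_equal_validate_session_name : Prop := ∀ (name : String), Dom_validate_session_name name → Spec_validate_session_name name (validate_session_name name)

-- ===== LEMMAS AND PROOFS =====

theorem singleton_infix_iff_mem {α : Type} (c : α) (l : List α) : [c] <:+: l ↔ c ∈ l := by
  constructor
  · intro h
    exact (List.singleton_sublist).1 h.sublist
  · intro h
    obtain ⟨s, t, rfl⟩ := List.append_of_mem h
    exact ⟨s, t, by simp⟩

theorem isIn_singleton (c : Char) (s : String) :
    PySem.Str.isIn (String.ofList [c]) s = s.toList.contains c := by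
  rw [Bool.eq_iff_iff, PySem.Str.isIn_iff_infix]
  simp [singleton_infix_iff_mem]

-- ===== VERDICT (by name: the statement is the Claim_ definition above) =====
theorem validate_session_name_spec : Claim_equal_validate_session_name := by
  intro name _
  unfold Spec_validate_session_name validate_session_name validate_session_name_alt
  by_cases h : name.toList = []
  · simp [h]
  · simp only [h, if_false]
    have e : (["\"", "'", "\\", "\n", "\r", "\t"] : List String).any
        (fun ch => PySem.Str.isIn ch name)
        = pvBadChars.any (fun c => name.toList.contains c) := by
      simp only [List.any_cons, List.any_nil, pvBadChars]
      rw [show ("\"" : String) = String.ofList ['"'] from rfl,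
          show ("'" : String) = String.ofList ['\''] from rfl,
          show ("\\" : String) = String.ofList ['\\'] from rfl,
          show ("\n" : String) = String.ofList ['\n'] from rfl,
          show ("\r" : String) = String.ofList ['\r'] from rfl,
          show ("\t" : String) = String.ofList ['\t'] from rfl]
      simp only [isIn_singleton]
    rw [e]
    have key : pvBadChars.any (fun c => name.toList.contains c)
        = !(name.toList.all fun c => !(pvBadChars.contains c)) := by
      rw [Bool.eq_iff_iff]
      simp only [List.any_eq_true, Bool.not_eq_true', List.all_eq_false, List.contains_eq_mem,
        decide_eq_true_eq, Bool.not_eq_false]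
      aesop
    rw [key]
    cases name.toList.all fun c => !(pvBadChars.contains c) <;> simp
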